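-- pv_equiv track=rewrite | github.com/BenjaminMummery/phone-footage-sorter | src/plex_footage_sorter/_rename.py | _convert_glob_to_capturing_regex
-- ===== SOURCE A (Python) =====
-- def _convert_glob_to_capturing_regex(pattern: str) -> str:
--     """Convert a glob string to a regex with capturing groups.
--
--     This aims to duplicate the functionality of `fnmatch.translate`, but with
--     separate capturing groups wherever glob special characters appear.
--     For example,
--
--     ```txt
--     my_file_*
--     ```
--
--     will be converted to:
--
--     ```regex
--     my_file_(.*)
--     ```
--
--     The full conversion table is:
--
--     | glob str | regex | notes                                                       |
--     |----------|-------|-------------------------------------------------------------|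
--     | *        | (.*)  | match any number of characters (including 0)                |
--     | ?        |       | match any single character.                              NI |
--     | [abc]    |       | match one character given in the bracket.                NI |
--     | [a-z]    |       | match one character from the range given in the bracket. NI |
--     | [!abc]   |       | match one character that is not given in the bracket.    NI |
--     | [!a-z]   |       | match one character that is not from the range.          NI |
--
--     Currently only `*` is implemented.
--
--     Args:
--         pattern (str): _description_
--
--     Returns:
--         str: _description_
--     """
--     if any(x in pattern for x in ["["]):
--         raise NotImplementedError(
--             f"Pattern '{pattern}' contains glob wildcards that are not yet supported."
--         )
--
--     outstr = "(.*)".join(pattern.split("*"))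
--     outstr = "(.)".join(outstr.split("?"))
--     return outstr
-- ===== SOURCE B (Python) =====
-- def _convert_glob_to_capturing_regex(pattern: str) -> str:
--     # Single left-to-right scan: guard and both replacements fused into one pass.
--     out = []
--     for ch in pattern:
--         if ch == "[":
--             raise NotImplementedError(
--                 f"Pattern '{pattern}' contains glob wildcards that are not yet supported."
--             )
--         if ch == "*":
--             out.append("(.*)")
--         elif ch == "?":
--             out.append("(.)")
--         else:
--             out.append(ch)
--     return "".join(out)
-- ===== Notes on version B (the rewrite author's own statement) =====
-- stated objective: simpler
-- what changed: Replaces A's bracket-membership guard plus its two separate split/join substitution passes with a single character-level scan that emits each character's capturing-group replacement (or the character itself) directly.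
import Mathlib
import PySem

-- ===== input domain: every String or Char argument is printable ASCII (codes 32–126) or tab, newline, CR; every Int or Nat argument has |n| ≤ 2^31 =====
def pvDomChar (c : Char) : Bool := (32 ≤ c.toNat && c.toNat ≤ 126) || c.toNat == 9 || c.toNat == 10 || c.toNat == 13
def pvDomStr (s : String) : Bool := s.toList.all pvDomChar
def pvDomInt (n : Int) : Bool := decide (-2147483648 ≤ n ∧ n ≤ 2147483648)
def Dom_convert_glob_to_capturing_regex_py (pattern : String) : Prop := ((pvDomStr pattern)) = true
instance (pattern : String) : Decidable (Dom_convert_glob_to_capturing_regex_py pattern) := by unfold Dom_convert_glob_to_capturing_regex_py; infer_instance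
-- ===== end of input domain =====

-- B fuses A's '[' membership guard and its two split/join replacement passes into one
-- character-level scan (same O(n) cost; objective: simpler). Both raise NotImplementedError
-- when '[' occurs in the pattern; those inputs are excluded by Pre_.


-- ===== PORT A =====
-- if any(x in pattern for x in ["["]): raise NotImplementedError(...)
-- outstr = "(.*)".join(pattern.split("*")); outstr = "(.)".join(outstr.split("?")); return outstr
def convert_glob_to_capturing_regex_py (pattern : String) : String :=
  if (["["] : List String).any (fun x => PySem.Str.isIn x pattern) then
    ""  -- Python raises NotImplementedError here; these inputs are outside Pre_
  else
    let outstr := PySem.Chars.join "(.*)".toList (PySem.Chars.splitOn pattern.toList ['*'])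
    let outstr2 := PySem.Chars.join "(.)".toList (PySem.Chars.splitOn outstr ['?'])
    String.ofList outstr2

-- ===== PORT B =====
-- one pass: for ch in pattern: guard '[', append "(.*)" / "(.)" / ch; return "".join(out)
def convert_glob_to_capturing_regex_py_alt (pattern : String) : String :=
  String.ofList (pattern.toList.foldl (fun acc ch =>
    if ch = '[' then acc  -- Python raises NotImplementedError here; these inputs are outside Pre_
    else if ch = '*' then acc ++ "(.*)".toList
    else if ch = '?' then acc ++ "(.)".toList
    else acc ++ [ch]) [])

-- ===== PRECONDITION & SPEC =====
-- Pre_ excludes exactly the patterns containing '[', on which the Python A (and B) raises NotImplementedError.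
def Pre_convert_glob_to_capturing_regex_py (pattern : String) : Prop :=
  PySem.Str.isIn "[" pattern = false
instance (pattern : String) : Decidable (Pre_convert_glob_to_capturing_regex_py pattern) := by unfold Pre_convert_glob_to_capturing_regex_py; infer_instance
def pvWitness_convert_glob_to_capturing_regex_py : String := "my_file_*?.mp4"

def Spec_convert_glob_to_capturing_regex_py (pattern : String) (out : String) : Prop := out = convert_glob_to_capturing_regex_py_alt pattern
instance (pattern : String) (out : String) : Decidable (Spec_convert_glob_to_capturing_regex_py pattern out) := by unfold Spec_convert_glob_to_capturing_regex_py; infer_instance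

-- ===== CLAIM (what is proved, stated in full; the proofs are below) =====
def Claim_equal_convert_glob_to_capturing_regex_py : Prop := ∀ (pattern : String), Dom_convert_glob_to_capturing_regex_py pattern → Pre_convert_glob_to_capturing_regex_py pattern → Spec_convert_glob_to_capturing_regex_py pattern (convert_glob_to_capturing_regex_py pattern)

-- ===== LEMMAS AND PROOFS =====

-- Structural characterisation of PySem.Chars.splitOn for a single-character separator.
def splitChar (c : Char) : List Char → List (List Char)
  | [] => [[]]
  | x :: xs => if x = c then [] :: splitChar c xs else (splitChar c xs).modifyHead (x :: ·)

theorem splitChar_ne_nil (c : Char) (l : List Char) : splitChar c l ≠ [] := by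
  induction l with
  | nil => simp [splitChar]
  | cons x xs ih =>
    simp only [splitChar]
    split
    · simp
    · cases h : splitChar c xs with
      | nil => exact absurd h ih
      | cons a t => simp [List.modifyHead]

theorem go_spec (c : Char) (fuel : Nat) (l cur : List Char) (acc : List (List Char))
    (h : l.length < fuel) :
    PySem.Chars.splitOn.go [c] fuel l cur acc
      = acc.reverse ++ (splitChar c l).modifyHead (cur.reverse ++ ·) := by
  induction fuel generalizing l cur acc with
  | zero => omega
  | succ n ih =>
    cases l with
    | nil => simp [PySem.Chars.splitOn.go, splitChar, List.modifyHead]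
    | cons x xs =>
      rw [PySem.Chars.splitOn.go]
      by_cases hx : x = c
      · subst hx
        have hp : [x].isPrefixOf (x :: xs) = true := by simp [List.isPrefixOf]
        simp only [hp, if_pos, List.length_cons, List.drop_succ_cons, List.length_nil,
          List.drop_zero]
        rw [ih xs [] (cur.reverse :: acc) (by simp at h; omega)]
        cases hsc : splitChar x xs <;> simp [splitChar, hsc, List.modifyHead]
      · have hp : [c].isPrefixOf (x :: xs) = false := by
          simp [List.isPrefixOf]
          exact fun hcx => absurd hcx.symm hx
        simp only [hp, if_neg, Bool.false_eq_true, not_false_iff]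
        rw [ih xs (x :: cur) acc (by simp at h; omega)]
        have hne := splitChar_ne_nil c xs
        cases hsc : splitChar c xs with
        | nil => exact absurd hsc hne
        | cons a t =>
          simp [splitChar, hx, hsc, List.modifyHead]

theorem join_splitChar (g : List Char) (c : Char) (cs : List Char) :
    PySem.Chars.join g (splitChar c cs) = cs.flatMap (fun x => if x = c then g else [x]) := by
  induction cs with
  | nil => simp [splitChar, PySem.Chars.join_singleton]
  | cons x xs ih =>
    cases hsc : splitChar c xs with
    | nil => exact absurd hsc (splitChar_ne_nil c xs)
    | cons a t =>
      rw [hsc] at ih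
      by_cases hx : x = c
      · subst hx
        simp only [splitChar, hsc, List.flatMap_cons]
        simp [PySem.Chars.join_cons_cons, ih]
      · simp only [splitChar, hsc, List.modifyHead, List.flatMap_cons, if_neg hx]
        cases t with
        | nil =>
          rw [PySem.Chars.join_singleton] at ih
          rw [PySem.Chars.join_singleton]
          simp [ih]
        | cons b t' =>
          rw [PySem.Chars.join_cons_cons] at ih
          rw [PySem.Chars.join_cons_cons]
          simp [← ih]

theorem join_splitOn_char (g : List Char) (c : Char) (cs : List Char) :
    PySem.Chars.join g (PySem.Chars.splitOn cs [c])
      = cs.flatMap (fun x => if x = c then g else [x]) := by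
  unfold PySem.Chars.splitOn
  rw [go_spec c (cs.length + 1) cs [] [] (by omega)]
  have hid : ∀ (L : List (List Char)), L.modifyHead (fun x => [].reverse ++ x) = L := by
    intro L; cases L <;> simp [List.modifyHead]
  rw [hid]
  simp only [List.reverse_nil, List.nil_append]
  exact join_splitChar g c cs

-- The two successive substitutions of A compose into the one-pass substitution of B.
theorem two_pass_eq_one_pass (cs : List Char) :
    (cs.flatMap (fun x => if x = '*' then "(.*)".toList else [x])).flatMap
        (fun x => if x = '?' then "(.)".toList else [x])
      = cs.flatMap (fun x =>
          if x = '*' then "(.*)".toList else if x = '?' then "(.)".toList else [x]) := by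
  rw [List.flatMap_assoc]
  apply List.flatMap_congr
  intro x _
  by_cases h1 : x = '*'
  · subst h1; decide
  · by_cases h2 : x = '?'
    · subst h2; simp [h1]
    · simp [h1, h2]

-- B's fold, on a pattern without '[', accumulates exactly the one-pass substitution.
theorem alt_fold_spec (cs : List Char) (hno : '[' ∉ cs) (acc : List Char) :
    cs.foldl (fun acc ch =>
        if ch = '[' then acc
        else if ch = '*' then acc ++ "(.*)".toList
        else if ch = '?' then acc ++ "(.)".toList
        else acc ++ [ch]) acc
      = acc ++ cs.flatMap (fun x =>
          if x = '*' then "(.*)".toList else if x = '?' then "(.)".toList else [x]) := by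
  induction cs generalizing acc with
  | nil => simp
  | cons x xs ih =>
    have hx : x ≠ '[' := fun h => hno (h ▸ List.mem_cons_self)
    have hxs : '[' ∉ xs := fun h => hno (List.mem_cons_of_mem _ h)
    simp only [List.foldl_cons, if_neg hx, List.flatMap_cons]
    by_cases h1 : x = '*'
    · simp only [if_pos h1]; rw [ih hxs]; simp
    · by_cases h2 : x = '?'
      · simp only [if_neg h1, if_pos h2]; rw [ih hxs]; simp
      · simp only [if_neg h1, if_neg h2]; rw [ih hxs]; simp

-- ===== VERDICT (by name: the statement is the Claim_ definition above) =====
theorem convert_glob_to_capturing_regex_py_spec : Claim_equal_convert_glob_to_capturing_regex_py := by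
  intro pattern _ hpre
  unfold Pre_convert_glob_to_capturing_regex_py at hpre
  unfold Spec_convert_glob_to_capturing_regex_py
  unfold convert_glob_to_capturing_regex_py convert_glob_to_capturing_regex_py_alt
  have hinfix : ¬ ("[".toList <:+: pattern.toList) := by
    have := hpre
    simp only [PySem.Str.isIn_eq] at this
    exact (PySem.Chars.isIn_eq_false_iff _ _).mp this
  have hno : '[' ∉ pattern.toList := by
    intro hmem
    exact hinfix ((List.singleton_infix_iff '[' pattern.toList).mpr hmem)
  simp only [List.any_cons, List.any_nil, hpre, Bool.or_false, Bool.false_eq_true, if_false]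
  rw [join_splitOn_char, join_splitOn_char, two_pass_eq_one_pass,
    alt_fold_spec pattern.toList hno []]
  simp
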